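-- pv_equiv track=rewrite | github.com/pirayan20/2110101_Com_Prog | Grader/09/09_NestedList_★★★_Fill_In_Numbers.py | pattern4
-- ===== SOURCE A (Python) =====
-- def pattern4(n):
--     idx = 1
--     num = 0
--     l = []
--     for i in range(n):
--         k = i + 2
--         num = idx
--         c = []
--         c += [0]*i
--         while len(c) != n:
--             c.append(num)
--             num += k
--             k += 1
--         l.append(c)
--         idx += i + 1
--     return l
-- ===== SOURCE B (Python) =====
-- def pattern4(n):
--     return [[0 if j < i else j * (j + 1) // 2 + j - i + 1 for j in range(n)]
--             for i in range(n)]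
-- ===== Notes on version B (the rewrite author's own statement) =====
-- stated objective: simpler
-- what changed: Replaced A's stateful row construction (running idx/num/k counters threaded across rows plus an inner while loop appending growing increments) with a direct per-cell closed formula evaluated in a nested comprehension.
import Mathlib
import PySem

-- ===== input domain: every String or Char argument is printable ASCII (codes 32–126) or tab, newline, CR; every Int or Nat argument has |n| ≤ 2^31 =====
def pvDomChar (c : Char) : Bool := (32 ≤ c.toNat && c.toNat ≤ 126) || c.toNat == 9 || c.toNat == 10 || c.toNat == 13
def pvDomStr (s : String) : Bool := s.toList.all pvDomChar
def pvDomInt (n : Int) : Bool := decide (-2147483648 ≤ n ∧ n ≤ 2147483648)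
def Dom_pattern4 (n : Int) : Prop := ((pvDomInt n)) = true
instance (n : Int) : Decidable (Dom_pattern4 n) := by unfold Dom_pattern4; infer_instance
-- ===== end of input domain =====

-- B replaces A's stateful row loops (idx/num/k counters and a while loop) by a per-cell
-- closed formula; objective: simpler, same O(n^2) cost.

-- ===== PORT A =====
-- the while loop: 'while len(c) != n: c.append(num); num += k; k += 1'
-- (guarded with '<' instead of '≠' only to make the same computation total; A always reaches it with len(c) ≤ n)
def fillRow (N : Nat) (c : List Int) (num k : Int) : List Int :=
  if _ : c.length < N then fillRow N (c ++ [num]) (num + k) (k + 1) else c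
termination_by N - c.length
decreasing_by simp; omega

def pattern4 (n : Int) : List (List Int) :=
  ((PySem.List.pyRange 0 n 1).foldl
    (fun (st : Int × List (List Int)) i =>
      let k := i + 2
      let num := st.1
      let c := List.replicate i.toNat (0 : Int)
      let c' := fillRow n.toNat c num k
      (st.1 + i + 1, st.2 ++ [c']))
    (1, [])).2

-- ===== PORT B =====
def pattern4_alt (n : Int) : List (List Int) :=
  (PySem.List.pyRange 0 n 1).map (fun i =>
    (PySem.List.pyRange 0 n 1).map (fun j =>
      if j < i then 0 else PySem.Int.floordiv (j * (j + 1)) 2 + j - i + 1))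

-- ===== PRECONDITION & SPEC =====
def Spec_pattern4 (n : Int) (out : List (List Int)) : Prop := out = pattern4_alt n
instance (n : Int) (out : List (List Int)) : Decidable (Spec_pattern4 n out) := by unfold Spec_pattern4; infer_instance

-- ===== CLAIM (what is proved, stated in full; the proofs are below) =====
def Claim_equal_pattern4 : Prop := ∀ (n : Int), Dom_pattern4 n → Spec_pattern4 n (pattern4 n)

-- ===== LEMMAS AND PROOFS =====

-- B's cell value at row i, column j (the 'else' branch of B's formula)
def fCell (j i : Int) : Int := PySem.Int.floordiv (j * (j + 1)) 2 + j - i + 1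

-- B's row i
def rowB (n i : Int) : List Int :=
  (PySem.List.pyRange 0 n 1).map (fun j =>
    if j < i then 0 else PySem.Int.floordiv (j * (j + 1)) 2 + j - i + 1)

-- the values A's while loop appends
def rowTail : Nat → Int → Int → List Int
  | 0, _, _ => []
  | m + 1, num, k => num :: rowTail m (num + k) (k + 1)

lemma fill_eq (N : Nat) :
    ∀ (m : Nat) (c : List Int) (num k : Int), c.length + m = N →
      fillRow N c num k = c ++ rowTail m num k := by
  intro m
  induction m with
  | zero =>
    intro c num k h
    rw [fillRow]
    simp [rowTail]
    omega
  | succ m ih =>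
    intro c num k h
    rw [fillRow]
    have hlt : c.length < N := by omega
    simp only [hlt, dif_pos]
    rw [ih (c ++ [num]) (num + k) (k + 1) (by simp; omega)]
    simp [rowTail]

lemma floordiv_step (j : Int) :
    PySem.Int.floordiv ((j + 1) * (j + 2)) 2 = PySem.Int.floordiv (j * (j + 1)) 2 + (j + 1) := by
  rw [PySem.Int.floordiv_eq_ediv_of_pos (by omega), PySem.Int.floordiv_eq_ediv_of_pos (by omega)]
  have : (j + 1) * (j + 2) = j * (j + 1) + (j + 1) * 2 := by ring
  rw [this, Int.add_mul_ediv_right _ _ (by norm_num)]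

lemma fCell_step (j i : Int) : fCell j i + (j + 2) = fCell (j + 1) i := by
  unfold fCell
  have h : (j + 1) * (j + 1 + 1) = (j + 1) * (j + 2) := by ring
  rw [h, floordiv_step]
  ring

lemma tail_map (i : Int) :
    ∀ (m : Nat) (j : Int),
      rowTail m (fCell j i) (j + 2) = (List.range m).map (fun t : Nat => fCell (j + (t : Int)) i) := by
  intro m
  induction m with
  | zero => intro j; simp [rowTail]
  | succ m ih =>
    intro j
    rw [List.range_succ_eq_map]
    simp only [rowTail, List.map_cons]
    refine List.cons_eq_cons.mpr ⟨by simp, ?_⟩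
    rw [fCell_step j i, show (j + 2) + 1 = (j + 1) + 2 from by ring, ih (j + 1),
        List.map_map]
    apply List.map_congr_left
    intro t _
    simp only [Function.comp, Nat.succ_eq_add_one]
    congr 1
    push_cast
    ring

lemma rowB_eq (n i : Int) (h0 : 0 ≤ i) (h1 : i ≤ n) :
    rowB n i = List.replicate i.toNat 0 ++
      (List.range (n.toNat - i.toNat)).map (fun t : Nat => fCell (i + (t : Int)) i) := by
  unfold rowB
  rw [PySem.List.pyRange_one]
  have hsplit : (n - 0).toNat = i.toNat + (n.toNat - i.toNat) := by omega
  rw [hsplit, List.range_add]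
  simp only [List.map_append, List.map_map]
  congr 1
  · rw [List.eq_replicate_iff]
    refine ⟨by simp, ?_⟩
    intro b hb
    simp only [List.mem_map, List.mem_range] at hb
    obtain ⟨k, hk, hb⟩ := hb
    rw [← hb]
    simp only [Function.comp]
    rw [if_pos (by omega : (0 : Int) + (k : Int) < i)]
  · apply List.map_congr_left
    intro t _
    simp only [Function.comp]
    have hc : (0 : Int) + ((i.toNat + t : Nat) : Int) = i + (t : Int) := by
      push_cast [Int.toNat_of_nonneg h0]; ring
    rw [hc, if_neg (by omega : ¬ (i + (t : Int) < i))]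
    rfl

lemma row_eq (n i : Int) (h0 : 0 ≤ i) (h1 : i < n) :
    fillRow n.toNat (List.replicate i.toNat 0) (fCell i i) (i + 2) = rowB n i := by
  rw [fill_eq n.toNat (n.toNat - i.toNat) _ _ _ (by simp; omega)]
  rw [rowB_eq n i h0 (by omega), tail_map i (n.toNat - i.toNat) i]

lemma outer (n : Int) :
    ∀ (m : Nat) (s : Int) (acc : List (List Int)), 0 ≤ s → (n - s).toNat = m →
      ((PySem.List.pyRange s n 1).foldl
        (fun (st : Int × List (List Int)) i =>
          (st.1 + i + 1, st.2 ++ [fillRow n.toNat (List.replicate i.toNat (0 : Int)) st.1 (i + 2)]))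
        (fCell s s, acc)).2
      = acc ++ (PySem.List.pyRange s n 1).map (rowB n) := by
  intro m
  induction m with
  | zero =>
    intro s acc hs hm
    rw [PySem.List.pyRange_one_eq_nil (by omega)]
    simp
  | succ m ih =>
    intro s acc hs hm
    have hlt : s < n := by omega
    rw [PySem.List.pyRange_one_cons hlt]
    simp only [List.foldl_cons, List.map_cons]
    have hidx : fCell s s + s + 1 = fCell (s + 1) (s + 1) := by
      have := fCell_step s s
      unfold fCell at *
      omega
    rw [row_eq n s hs hlt, hidx,
        ih (s + 1) (acc ++ [rowB n s]) (by omega) (by omega)]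
    simp

theorem pattern4_eq_alt (n : Int) : pattern4 n = pattern4_alt n := by
  show (List.foldl
      (fun (st : Int × List (List Int)) i =>
        (st.1 + i + 1, st.2 ++ [fillRow n.toNat (List.replicate i.toNat (0 : Int)) st.1 (i + 2)]))
      ((1 : Int), ([] : List (List Int))) (PySem.List.pyRange 0 n 1)).2 = pattern4_alt n
  have h1 : ((1 : Int), ([] : List (List Int))) = (fCell 0 0, ([] : List (List Int))) := by decide
  rw [h1, outer n (n - 0).toNat 0 [] (by omega) rfl]
  rfl

-- ===== VERDICT (by name: the statement is the Claim_ definition above) =====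
theorem pattern4_spec : Claim_equal_pattern4 := by
  intro n _
  unfold Spec_pattern4
  exact pattern4_eq_alt n
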